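-- pv_equiv track=rewrite | github.com/rosedj1/HiggsMassMeasurement | d0_Studies/d0_Analyzers/Synch_with_Filippo/save_m4mu_info_andcorr_ggF_synchwithFilippo.py | validate_lep_genindex
-- ===== SOURCE A (Python) =====
-- def validate_lep_genindex(lep_genindex_ls):
--     """
--     Return True, if lep_genindex_ls satisfies the following:
--         - Make sure it has at least 4 positive elements:
--             - [2, 3, 0, 1]
--             - [2, 0, 1, -1, -1, 3]
--         - For indices >= 0, make sure there are no duplicate indices.
--     """
--     # Find all positive elements.
--     pruned_ls = [x for x in lep_genindex_ls if x >= 0]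
--     if len(pruned_ls) < 4:
--         return False
--     elif len(pruned_ls) != len(set(pruned_ls)):
--         # Duplicates detected.
--         return False
--     else:
--         return True
-- ===== SOURCE B (Python) =====
-- def validate_lep_genindex(lep_genindex_ls):
--     """Sort-based check: sort the non-negative entries, require length >= 4
--     and strictly increasing adjacent pairs (no duplicates)."""
--     pruned = sorted(x for x in lep_genindex_ls if x >= 0)
--     if len(pruned) < 4:
--         return False
--     return all(a < b for a, b in zip(pruned, pruned[1:]))
-- ===== Notes on version B (the rewrite author's own statement) =====
-- stated objective: alternative
-- what changed: Detects duplicates by sorting the non-negative entries and scanning adjacent pairs for strict increase, instead of A's set-construction and length comparison.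
import Mathlib
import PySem

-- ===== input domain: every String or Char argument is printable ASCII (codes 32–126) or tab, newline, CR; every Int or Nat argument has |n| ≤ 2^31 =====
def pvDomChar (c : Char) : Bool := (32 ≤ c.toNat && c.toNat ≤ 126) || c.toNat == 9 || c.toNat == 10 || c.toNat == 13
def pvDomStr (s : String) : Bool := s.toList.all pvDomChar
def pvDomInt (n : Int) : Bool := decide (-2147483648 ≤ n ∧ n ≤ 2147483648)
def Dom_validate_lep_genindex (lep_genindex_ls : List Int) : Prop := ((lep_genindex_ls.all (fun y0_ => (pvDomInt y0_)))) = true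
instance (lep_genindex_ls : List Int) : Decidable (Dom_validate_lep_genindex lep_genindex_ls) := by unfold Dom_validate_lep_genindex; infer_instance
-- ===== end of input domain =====

-- B sorts the non-negative entries and checks adjacent pairs strictly increase, instead of A's set-size comparison; same result everywhere.
-- ===== PORT A =====
def validate_lep_genindex (lep_genindex_ls : List Int) : Bool :=
  let pruned_ls := lep_genindex_ls.filter (fun x => decide (x ≥ 0))
  if pruned_ls.length < 4 then false
  else if pruned_ls.length ≠ (PySem.Set.ofList pruned_ls).length then false
  else true

-- ===== PORT B =====
def validate_lep_genindex_alt (lep_genindex_ls : List Int) : Bool :=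
  let pruned := PySem.List.sorted (lep_genindex_ls.filter (fun x => decide (x ≥ 0))) (fun x => x) false
  if pruned.length < 4 then false
  else (pruned.zip (pruned.drop 1)).all (fun p => decide (p.1 < p.2))

-- ===== PRECONDITION & SPEC =====
def Spec_validate_lep_genindex (lep_genindex_ls : List Int) (out : Bool) : Prop := out = validate_lep_genindex_alt lep_genindex_ls
instance (lep_genindex_ls : List Int) (out : Bool) : Decidable (Spec_validate_lep_genindex lep_genindex_ls out) := by unfold Spec_validate_lep_genindex; infer_instance

-- ===== CLAIM (what is proved, stated in full; the proofs are below) =====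
def Claim_equal_validate_lep_genindex : Prop := ∀ (lep_genindex_ls : List Int), Dom_validate_lep_genindex lep_genindex_ls → Spec_validate_lep_genindex lep_genindex_ls (validate_lep_genindex lep_genindex_ls)

-- ===== LEMMAS AND PROOFS =====

-- length of discard on a nodup set = length of erase
lemma vlg_discard_perm_erase (s : List Int) (x : Int) (hs : s.Nodup) :
    (PySem.Set.discard s x).Perm (s.erase x) := by
  rw [List.perm_ext_iff_of_nodup (PySem.Set.nodup_discard s x hs) (hs.erase x)]
  intro a
  simp [PySem.Set.mem_discard, hs.mem_erase_iff, and_comm]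

-- |set(xs)| = |xs| iff xs has no duplicates
lemma vlg_len_ofList_eq_iff (xs : List Int) :
    (PySem.Set.ofList xs).length = xs.length ↔ xs.Nodup := by
  induction xs with
  | nil => simp [PySem.Set.ofList_nil]
  | cons x xs ih =>
    rw [PySem.Set.ofList_cons]
    have hperm := vlg_discard_perm_erase (PySem.Set.ofList xs) x (PySem.Set.nodup_ofList xs)
    have hlen := hperm.length_eq
    by_cases hx : x ∈ xs
    · have hx' : x ∈ PySem.Set.ofList xs := (PySem.Set.mem_ofList xs x).2 hx
      have : ((PySem.Set.ofList xs).erase x).length = (PySem.Set.ofList xs).length - 1 :=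
        List.length_erase_of_mem hx'
      have hle := PySem.Set.length_ofList_le (xs := xs)
      have hpos : 0 < (PySem.Set.ofList xs).length := List.length_pos_of_mem hx'
      simp only [List.length_cons, List.nodup_cons]
      constructor
      · intro h; omega
      · intro h; exact absurd hx h.1
    · have hx' : x ∉ PySem.Set.ofList xs := fun h => hx ((PySem.Set.mem_ofList xs x).1 h)
      have : (PySem.Set.ofList xs).erase x = PySem.Set.ofList xs := List.erase_of_not_mem hx'
      simp only [List.length_cons, List.nodup_cons]
      rw [hlen, this]
      constructor
      · intro h; exact ⟨hx, ih.1 (by omega)⟩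
      · intro h; rw [ih.2 h.2]

-- the adjacent-pairs scan computes IsChain (· < ·)
lemma vlg_zip_all_eq_chain' (l : List Int) :
    (l.zip (l.drop 1)).all (fun p => decide (p.1 < p.2)) = decide (l.IsChain (· < ·)) := by
  induction l with
  | nil => simp
  | cons a t ih =>
    cases t with
    | nil => simp
    | cons b t' =>
      have := ih
      simp only [List.drop_succ_cons, List.drop_zero, List.zip_cons_cons, List.all_cons,
        List.isChain_cons_cons] at this ⊢
      rw [this, Bool.decide_and]

-- for a nondecreasing list, strict adjacent increase ↔ no duplicates
lemma vlg_pairwise_lt_iff_nodup (l : List Int) (hs : l.Pairwise (· ≤ ·)) :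
    l.Pairwise (· < ·) ↔ l.Nodup := by
  constructor
  · intro h; exact h.imp (fun hab => ne_of_lt hab)
  · intro h; exact (hs.and h).imp (fun hab => lt_of_le_of_ne hab.1 hab.2)

theorem validate_lep_genindex_spec : Claim_equal_validate_lep_genindex := by
  intro ls _
  unfold Spec_validate_lep_genindex validate_lep_genindex validate_lep_genindex_alt
  set p := ls.filter (fun x => decide (x ≥ 0)) with hp
  set s := PySem.List.sorted p (fun x => x) false with hs
  have hperm : s.Perm p := PySem.List.sorted_perm (xs := p) (key := fun x => x) (rev := false)
  have hlen : s.length = p.length := hperm.length_eq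
  have hsorted : s.Pairwise (· ≤ ·) := by
    have := PySem.List.sorted_pairwise (xs := p) (key := fun x => x)
    simpa using this
  have hchain : (s.zip (s.drop 1)).all (fun q => decide (q.1 < q.2))
      = decide (p.Nodup) := by
    rw [vlg_zip_all_eq_chain', decide_eq_decide,
      List.isChain_iff_pairwise, vlg_pairwise_lt_iff_nodup s hsorted]
    exact hperm.nodup_iff
  simp only [hlen]
  by_cases h4 : p.length < 4
  · rw [if_pos h4, if_pos h4]
  · rw [if_neg h4, if_neg h4, hchain]
    by_cases hn : p.Nodup
    · have : (PySem.Set.ofList p).length = p.length := (vlg_len_ofList_eq_iff p).2 hn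
      rw [if_neg (show ¬ p.length ≠ (PySem.Set.ofList p).length by omega)]
      simp [hn]
    · have : (PySem.Set.ofList p).length ≠ p.length := fun h => hn ((vlg_len_ofList_eq_iff p).1 h)
      rw [if_pos (Ne.symm this)]
      simp [hn]
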